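-- pv_equiv track=rewrite | github.com/yhongzu/Schema-matching-for-energy | Data_Preprocessing/data_preprocessing.py | lsp_attribute
-- ===== SOURCE A (Python) =====
-- def lsp_attribute(s):
--     s = s.replace('_',' ')
--     s = s.replace('-',' ')
--     s = s.replace('(',' ')
--     s = s.replace(')',' ')
--     if ' ' in s:
--         return s
--     elif len(s)<2:
--         return s
--     else:
--         for i, element in enumerate(s):
--             if i == 0:
--                 if s[i] == element.upper() and s[i+1] == s[i+1].upper():
--                     return s
--             elif i > 0 and i < len(s)-1:
--                 if s[i] == element.upper() and (s[i-1] == s[i-1].upper() or  s[i+1] == s[i+1].upper()):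
--                     return s
--         s_list = list(s)
--         temp = 0
--         for i, element in enumerate(s):
--             if i != 0 and element == element.upper():
--                 s_list.insert(i+temp,' ')
--                 temp +=1
--         s = "".join(s_list)
--         return s
-- ===== SOURCE B (Python) =====
-- def lsp_attribute(s):
--     s = s.replace('_', ' ').replace('-', ' ').replace('(', ' ').replace(')', ' ')
--     if ' ' in s or len(s) < 2:
--         return s
--     out = [s[0]]
--     prev = s[0] == s[0].upper()
--     for c in s[1:]:
--         cur = c == c.upper()
--         if cur and prev:
--             return s
--         if cur:
--             out.append(' ')
--         out.append(c)
--         prev = cur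
--     return ''.join(out)
-- ===== Notes on version B (the rewrite author's own statement) =====
-- stated objective: faster
-- what changed: B fuses A's separate adjacent-upper detection loop and its insert-with-offset split loop into a single left-to-right pass that tracks only the previous character's upper-ness, returning the original string on the first adjacent upper-ish pair and otherwise appending to the output directly, eliminating the temp offset bookkeeping and the O(n) list.insert calls.
import Mathlib
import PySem

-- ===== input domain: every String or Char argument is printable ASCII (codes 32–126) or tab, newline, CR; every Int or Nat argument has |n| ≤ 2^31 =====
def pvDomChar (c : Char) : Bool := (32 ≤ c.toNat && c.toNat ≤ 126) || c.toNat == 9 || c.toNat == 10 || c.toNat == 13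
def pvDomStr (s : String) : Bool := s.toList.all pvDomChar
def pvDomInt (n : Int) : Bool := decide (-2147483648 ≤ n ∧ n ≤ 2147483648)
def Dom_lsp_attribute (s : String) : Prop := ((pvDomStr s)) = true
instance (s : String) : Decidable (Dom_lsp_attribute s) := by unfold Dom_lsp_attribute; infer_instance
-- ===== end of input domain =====

-- ===== PORT A =====
-- B fuses A's two index-driven loops (detection, then insert-with-offset split) into one previous-flag pass with direct appends (objective: faster, measured); helpers upE/pvRepl are the shared literal lines of both Pythons.
def upE (c : Char) : Bool := PySem.Chars.upperChar c == c

def pvRepl (cs : List Char) : List Char :=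
  PySem.Chars.replace (PySem.Chars.replace (PySem.Chars.replace
    (PySem.Chars.replace cs ['_'] [' ']) ['-'] [' ']) ['('] [' ']) [')'] [' ']

def pvDetect (cs : List Char) : Bool :=
  (List.range cs.length).any (fun i =>
    if i = 0 then upE (cs.getD i ' ') && upE (cs.getD (i+1) ' ')
    else if 0 < i ∧ i < cs.length - 1 then
      upE (cs.getD i ' ') && (upE (cs.getD (i-1) ' ') || upE (cs.getD (i+1) ' '))
    else false)

def pvSplit (cs : List Char) : List Char :=
  ((List.range cs.length).foldl (fun (st : List Char × Int) i =>
    if i != 0 && upE (cs.getD i ' ') then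
      (PySem.List.insert st.1 ((i : Int) + st.2) ' ', st.2 + 1)
    else st) (cs, 0)).1

def lsp_attribute (s : String) : String :=
  let cs := pvRepl s.toList
  if PySem.Chars.isIn [' '] cs then String.mk cs
  else if cs.length < 2 then String.mk cs
  else if pvDetect cs then String.mk cs
  else String.mk (pvSplit cs)

-- ===== PORT B =====
def goB : Bool → List Char → List Char → Option (List Char)
  | _, [], acc => some acc
  | prev, c :: rest, acc =>
    let cur := upE c
    if cur && prev then none
    else goB cur rest (if cur then acc ++ [' ', c] else acc ++ [c])

def lsp_attribute_alt (s : String) : String :=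
  let cs := pvRepl s.toList
  if PySem.Chars.isIn [' '] cs = true ∨ cs.length < 2 then String.mk cs
  else
    match cs with
    | [] => String.mk cs
    | c0 :: rest =>
      match goB (upE c0) rest [c0] with
      | none => String.mk cs
      | some out => String.mk out

-- ===== PRECONDITION & SPEC =====
def Spec_lsp_attribute (s : String) (out : String) : Prop := out = lsp_attribute_alt s
instance (s : String) (out : String) : Decidable (Spec_lsp_attribute s out) := by unfold Spec_lsp_attribute; infer_instance

-- ===== CLAIM (what is proved, stated in full; the proofs are below) =====
def Claim_equal_lsp_attribute : Prop := ∀ (s : String), Dom_lsp_attribute s → Spec_lsp_attribute s (lsp_attribute s)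

-- ===== LEMMAS AND PROOFS =====
-- pvP prev l = true: B's pass (with incoming flag prev) meets an adjacent upper-ish pair
def pvP : Bool → List Char → Bool
  | _, [] => false
  | prev, c :: r => (upE c && prev) || pvP (upE c) r

-- what B appends for the tail characters when no pair is met
def spreadTail (l : List Char) : List Char :=
  l.flatMap (fun c => if upE c then [' ', c] else [c])

def spreadA : List Char → List Char
  | [] => []
  | c :: t => c :: spreadTail t

theorem goB_none_iff (l : List Char) : ∀ (prev : Bool) (acc : List Char),
    goB prev l acc = none ↔ pvP prev l = true := by
  induction l with
  | nil => intro prev acc; simp [goB, pvP]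
  | cons c r ih =>
    intro prev acc
    simp only [goB, pvP]
    by_cases h : (upE c && prev) = true
    · simp [h]
    · simp [h, ih]

theorem goB_some (l : List Char) : ∀ (prev : Bool) (acc : List Char),
    pvP prev l = false → goB prev l acc = some (acc ++ spreadTail l) := by
  induction l with
  | nil => intro prev acc _; simp [goB, spreadTail]
  | cons c r ih =>
    intro prev acc h
    simp only [pvP, Bool.or_eq_false_iff] at h
    simp only [goB]
    rw [h.1, if_neg Bool.false_ne_true, ih _ _ h.2]
    by_cases hc : upE c = true <;> simp [hc, spreadTail]

theorem pvP_iff (l : List Char) : ∀ (prev : Bool),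
    pvP prev l = true ↔
      (prev = true ∧ 0 < l.length ∧ upE (l.getD 0 ' ') = true) ∨
      (∃ i, i + 1 < l.length ∧ upE (l.getD i ' ') = true ∧ upE (l.getD (i+1) ' ') = true) := by
  induction l with
  | nil => intro prev; simp [pvP]
  | cons c r ih =>
    intro prev
    simp only [pvP, Bool.or_eq_true, Bool.and_eq_true, ih]
    constructor
    · rintro (⟨hc, hp⟩ | ⟨hc, hr0, hu⟩ | ⟨i, hi, h1, h2⟩)
      · exact Or.inl ⟨hp, by simp, by simpa using hc⟩
      · refine Or.inr ⟨0, by simpa using hr0, by simpa using hc, ?_⟩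
        cases r with
        | nil => simp at hr0
        | cons a t => simpa using hu
      · exact Or.inr ⟨i + 1, by simpa using hi, by simpa using h1, by simpa using h2⟩
    · rintro (⟨hp, _, hu⟩ | ⟨i, hi, h1, h2⟩)
      · exact Or.inl ⟨by simpa using hu, hp⟩
      · cases i with
        | zero =>
          refine Or.inr (Or.inl ⟨by simpa using h1, ?_, ?_⟩)
          · simpa using hi
          · cases r with
            | nil => simp at hi
            | cons a t => simpa using h2
        | succ j =>
          exact Or.inr (Or.inr ⟨j, by simpa using hi, by simpa using h1, by simpa using h2⟩)

theorem pvDetect_iff (cs : List Char) (h2 : 2 ≤ cs.length) :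
    pvDetect cs = true ↔
      ∃ i, i + 1 < cs.length ∧ upE (cs.getD i ' ') = true ∧ upE (cs.getD (i+1) ' ') = true := by
  unfold pvDetect
  rw [List.any_eq_true]
  constructor
  · rintro ⟨i, hmem, hcond⟩
    rw [List.mem_range] at hmem
    by_cases h0 : i = 0
    · subst h0
      rw [if_pos rfl, Bool.and_eq_true] at hcond
      exact ⟨0, by omega, hcond.1, hcond.2⟩
    · rw [if_neg h0] at hcond
      by_cases hmid : 0 < i ∧ i < cs.length - 1
      · rw [if_pos hmid, Bool.and_eq_true, Bool.or_eq_true] at hcond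
        rcases hcond.2 with hl | hr
        · refine ⟨i - 1, by omega, ?_, ?_⟩
          · exact hl
          · have he : i - 1 + 1 = i := by omega
            rw [he]; exact hcond.1
        · exact ⟨i, by omega, hcond.1, hr⟩
      · rw [if_neg hmid] at hcond; exact absurd hcond (by simp)
  · rintro ⟨i, hi, h1, hsucc⟩
    by_cases h0 : i = 0
    · subst h0
      refine ⟨0, by rw [List.mem_range]; omega, ?_⟩
      rw [if_pos rfl, Bool.and_eq_true]
      exact ⟨h1, by simpa using hsucc⟩
    · refine ⟨i, by rw [List.mem_range]; omega, ?_⟩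
      rw [if_neg h0, if_pos (by omega), Bool.and_eq_true, Bool.or_eq_true]
      exact ⟨h1, Or.inr hsucc⟩

theorem pvDetect_eq_pvP (c0 : Char) (t : List Char) (h2 : 2 ≤ (c0 :: t).length) :
    pvDetect (c0 :: t) = pvP (upE c0) t := by
  rw [Bool.eq_iff_iff, pvDetect_iff _ h2, pvP_iff]
  constructor
  · rintro ⟨i, hi, h1, hs⟩
    cases i with
    | zero =>
      refine Or.inl ⟨by simpa using h1, ?_, ?_⟩
      · simp at hi; omega
      · cases t with
        | nil => simp at hi
        | cons a r => simpa using hs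
    | succ j =>
      exact Or.inr ⟨j, by simpa using hi, by simpa using h1, by simpa using hs⟩
  · rintro (⟨hc0, hlen, hu⟩ | ⟨i, hi, h1, hs⟩)
    · refine ⟨0, by simp; omega, by simpa using hc0, ?_⟩
      cases t with
      | nil => simp at hlen
      | cons a r => simpa using hu
    · exact ⟨i + 1, by simpa using hi, by simpa using h1, by simpa using hs⟩

theorem spreadA_concat (l : List Char) (x : Char) (hl : l ≠ []) :
    spreadA (l ++ [x]) = spreadA l ++ (if upE x then [' ', x] else [x]) := by
  cases l with
  | nil => exact absurd rfl hl
  | cons c m => simp [spreadA, spreadTail]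

theorem pvSplit_inv (cs : List Char) : ∀ k, k ≤ cs.length →
    (List.range k).foldl (fun (st : List Char × Int) i =>
      if i != 0 && upE (cs.getD i ' ') then
        (PySem.List.insert st.1 ((i : Int) + st.2) ' ', st.2 + 1)
      else st) (cs, 0)
    = (spreadA (cs.take k) ++ cs.drop k, ((spreadA (cs.take k)).length : Int) - k) := by
  intro k
  induction k with
  | zero => intro _; simp [spreadA]
  | succ k ih =>
    intro hk1
    have hk : k < cs.length := by omega
    rw [List.range_succ, List.foldl_append, ih (by omega)]
    have hget : cs.getD k ' ' = cs[k] := List.getD_eq_getElem cs ' ' hk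
    have hdrop : cs.drop k = cs[k] :: cs.drop (k + 1) := List.drop_eq_getElem_cons hk
    have htake : cs.take (k + 1) = cs.take k ++ [cs[k]] := by
      rw [← List.concat_eq_append, List.take_concat_get]
    simp only [List.foldl_cons, List.foldl_nil]
    by_cases h0 : k = 0
    · subst h0
      rw [if_neg (by simp)]
      cases cs with
      | nil => simp at hk
      | cons c0 r =>
        simp [spreadA, spreadTail]
    · have hne : (k != 0) = true := by simpa using h0
      have htne : cs.take k ≠ [] := by
        intro h
        rcases List.take_eq_nil_iff.mp h with h' | h'
        · exact h0 h'
        · subst h'; simp at hk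
      by_cases hu : upE cs[k] = true
      · rw [if_pos (show (k != 0 && upE (cs.getD k ' ')) = true by
          rw [hget]; simp [hne, hu])]
        have harith : (k : Int) + (((spreadA (cs.take k)).length : Int) - k)
            = ((spreadA (cs.take k)).length : Int) := by ring
        rw [harith,
          PySem.List.insert_natCast _ _ _ (by simp),
          List.take_left, List.drop_left]
        rw [htake, spreadA_concat _ _ htne, if_pos hu, hdrop]
        simp only [Prod.mk.injEq]
        refine ⟨by simp, ?_⟩
        simp only [List.length_append, List.length_cons, List.length_nil]
        push_cast
        ring
      · have hu' : upE cs[k] = false := by simpa using hu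
        rw [hget, if_neg (by simp [hu'])]
        rw [htake, spreadA_concat _ _ htne, if_neg (by simp [hu']), hdrop]
        simp only [Prod.mk.injEq]
        refine ⟨by simp, ?_⟩
        simp only [List.length_append, List.length_cons, List.length_nil]
        push_cast
        ring

theorem pvSplit_eq_spreadA (cs : List Char) : pvSplit cs = spreadA cs := by
  unfold pvSplit
  rw [pvSplit_inv cs cs.length le_rfl]
  simp

theorem core_eq (cs : List Char) :
    (if PySem.Chars.isIn [' '] cs then String.mk cs
     else if cs.length < 2 then String.mk cs
     else if pvDetect cs then String.mk cs
     else String.mk (pvSplit cs))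
    = (if PySem.Chars.isIn [' '] cs = true ∨ cs.length < 2 then String.mk cs
       else
         match cs with
         | [] => String.mk cs
         | c0 :: rest =>
           match goB (upE c0) rest [c0] with
           | none => String.mk cs
           | some out => String.mk out) := by
  by_cases h1 : PySem.Chars.isIn [' '] cs = true
  · simp [h1]
  · by_cases h2 : cs.length < 2
    · simp [h1, h2]
    · have hor : ¬(PySem.Chars.isIn [' '] cs = true ∨ cs.length < 2) := by
        intro h; rcases h with h | h
        · exact h1 h
        · exact h2 h
      rw [if_neg h1, if_neg h2, if_neg hor]
      have hlen : 2 ≤ cs.length := by omega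
      cases cs with
      | nil => simp at hlen
      | cons c0 rest =>
        rw [pvDetect_eq_pvP c0 rest hlen]
        cases hP : pvP (upE c0) rest with
        | true =>
          rw [if_pos rfl]
          show String.mk (c0 :: rest) = (match goB (upE c0) rest [c0] with
            | none => String.mk (c0 :: rest)
            | some out => String.mk out)
          rw [(goB_none_iff rest (upE c0) [c0]).mpr hP]
        | false =>
          rw [if_neg (by simp)]
          show String.mk (pvSplit (c0 :: rest)) = (match goB (upE c0) rest [c0] with
            | none => String.mk (c0 :: rest)
            | some out => String.mk out)
          rw [goB_some _ _ _ hP, pvSplit_eq_spreadA]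
          rfl

-- ===== VERDICT (by name: the statement is the Claim_ definition above) =====
theorem lsp_attribute_spec : Claim_equal_lsp_attribute := by
  intro s _
  unfold Spec_lsp_attribute lsp_attribute lsp_attribute_alt
  exact core_eq (pvRepl s.toList)
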